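-- pv_equiv track=rewrite | github.com/AndromedaOMA/SemEval-2026_Task4-Narrative-Similarity | src/outcomes/inference/inf_script.py | squash_runs
-- ===== SOURCE A (Python) =====
-- def squash_runs(s: str, ch: str) -> str:
--     out = []
--     run = 0
--     for c in s:
--         if c == ch:
--             run += 1
--             if run <= 1:
--                 out.append(c)
--         else:
--             run = 0
--             out.append(c)
--     return "".join(out)
-- ===== SOURCE B (Python) =====
-- def squash_runs(s: str, ch: str) -> str:
--     if not s:
--         return ""
--     return s[0] + "".join(c for p, c in zip(s, s[1:]) if c != ch or p != ch)
-- ===== Notes on version B (the rewrite author's own statement) =====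
-- stated objective: idiomatic
-- what changed: Replaces the explicit run-counter state machine with a stateless pairwise filter: zip the string with its tail and keep a character unless both it and its predecessor equal ch.
import Mathlib
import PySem

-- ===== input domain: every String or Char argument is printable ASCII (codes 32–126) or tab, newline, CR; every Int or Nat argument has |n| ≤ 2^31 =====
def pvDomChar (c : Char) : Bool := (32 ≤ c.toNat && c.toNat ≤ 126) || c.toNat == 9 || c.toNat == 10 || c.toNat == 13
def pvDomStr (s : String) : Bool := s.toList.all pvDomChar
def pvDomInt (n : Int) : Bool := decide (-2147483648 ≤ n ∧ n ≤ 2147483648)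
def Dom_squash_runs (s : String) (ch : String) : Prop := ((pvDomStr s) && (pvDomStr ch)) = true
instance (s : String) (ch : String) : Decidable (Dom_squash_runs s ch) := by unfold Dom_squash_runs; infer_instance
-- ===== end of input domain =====

-- B replaces A's run-counter state machine by a stateless pairwise filter (zip with the tail); same values, idiomatic decomposition.

-- ===== PORT A =====
-- literal port of A: loop body (one iteration of the for-loop) and a fold over the characters with state (out, run)
def squashStep (ch : String) (st : List Char × Int) (c : Char) : List Char × Int :=
  if String.ofList [c] = ch then
    let run := st.2 + 1
    if run ≤ 1 then (st.1 ++ [c], run) else (st.1, run)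
  else (st.1 ++ [c], 0)

def squash_runs (s : String) (ch : String) : String :=
  String.ofList (s.toList.foldl (squashStep ch) ([], 0)).1

-- ===== PORT B =====
-- literal port of B: head ++ (zip s s[1:] filtered by "keep iff c != ch or p != ch")
def squash_runs_alt (s : String) (ch : String) : String :=
  match s.toList with
  | [] => ""
  | c :: rest =>
    String.ofList (c :: ((((c :: rest).zip rest).filter
        (fun pc => decide (String.ofList [pc.2] ≠ ch ∨ String.ofList [pc.1] ≠ ch))).map Prod.snd))

-- ===== PRECONDITION & SPEC =====
def Spec_squash_runs (s : String) (ch : String) (out : String) : Prop := out = squash_runs_alt s ch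
instance (s : String) (ch : String) (out : String) : Decidable (Spec_squash_runs s ch out) := by unfold Spec_squash_runs; infer_instance

-- ===== CLAIM (what is proved, stated in full; the proofs are below) =====
def Claim_equal_squash_runs : Prop := ∀ (s : String) (ch : String), Dom_squash_runs s ch → Spec_squash_runs s ch (squash_runs s ch)

-- ===== LEMMAS AND PROOFS =====

-- common characterisation: squash with a "previous char was ch" flag
def pvSquash (ch : String) : List Char → Bool → List Char
  | [], _ => []
  | c :: cs, prev =>
    if String.ofList [c] = ch then
      (if prev then pvSquash ch cs true else c :: pvSquash ch cs true)
    else c :: pvSquash ch cs false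

theorem squashA_loop (ch : String) (cs : List Char) :
    ∀ (out : List Char) (run : Int), 0 ≤ run →
      (cs.foldl (squashStep ch) (out, run)).1
      = out ++ pvSquash ch cs (decide (1 ≤ run)) := by
  induction cs with
  | nil => intro out run _; simp [pvSquash]
  | cons c cs ih =>
    intro out run hrun
    rw [List.foldl_cons]
    by_cases hc : String.ofList [c] = ch
    · by_cases hle : run + 1 ≤ 1
      · have h0 : run = 0 := by omega
        subst h0
        have hstep : squashStep ch (out, 0) c = (out ++ [c], 1) := by
          simp [squashStep, hc]
        rw [hstep, ih (out ++ [c]) 1 (by norm_num)]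
        simp [pvSquash, hc]
      · have h1 : (1:Int) ≤ run := by omega
        have hstep : squashStep ch (out, run) c = (out, run + 1) := by
          simp [squashStep, hc, hle]
        rw [hstep, ih out (run + 1) (by omega)]
        have h0 : decide ((0:Int) ≤ run) = true := by simpa using hrun
        simp [pvSquash, hc, h1, h0]
    · have hstep : squashStep ch (out, run) c = (out ++ [c], 0) := by
        simp [squashStep, hc]
      rw [hstep, ih (out ++ [c]) 0 le_rfl]
      simp [pvSquash, hc]

theorem squashB_zip (ch : String) (rest : List Char) :
    ∀ (p : Char),
      (((p :: rest).zip rest).filter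
        (fun pc => decide (String.ofList [pc.2] ≠ ch ∨ String.ofList [pc.1] ≠ ch))).map Prod.snd
      = pvSquash ch rest (decide (String.ofList [p] = ch)) := by
  induction rest with
  | nil => intro p; simp [pvSquash]
  | cons c cs ih =>
    intro p
    have ihc := ih c
    rw [List.zip_cons_cons, List.filter_cons]
    by_cases hc : String.ofList [c] = ch
    · by_cases hp : String.ofList [p] = ch
      · simp [pvSquash, hc, hp] at ihc ⊢
        exact ihc
      · simp [pvSquash, hc, hp] at ihc ⊢
        exact ihc
    · simp [pvSquash, hc] at ihc ⊢
      exact ihc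

theorem pvSquash_head (ch : String) (c : Char) (cs : List Char) :
    pvSquash ch (c :: cs) false = c :: pvSquash ch cs (decide (String.ofList [c] = ch)) := by
  by_cases hc : String.ofList [c] = ch <;> simp [pvSquash, hc]

-- ===== VERDICT (by name: the statement is the Claim_ definition above) =====
theorem squash_runs_spec : Claim_equal_squash_runs := by
  intro s ch _
  unfold Spec_squash_runs squash_runs squash_runs_alt
  rw [squashA_loop ch s.toList [] 0 le_rfl]
  cases h : s.toList with
  | nil => simp [pvSquash]
  | cons c rest =>
    simp only [List.nil_append]
    rw [squashB_zip ch rest c]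
    rw [show (decide ((1:Int) ≤ 0)) = false from rfl, pvSquash_head]
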